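-- pv_equiv track=rewrite | github.com/cokemania2/LeetCode | 프로그래머스/2/76502. 괄호 회전하기/괄호 회전하기.py | solution
-- ===== SOURCE A (Python) =====
-- from collections import deque
--
-- def is_valid(s_list):
--     stack = []
--
--     for s in s_list:
--         if len(stack) > 0 and (s == ')' and stack[-1] == '(' or s == '}' and stack[-1] == '{' or s == ']' and stack[-1] == '['):
--             stack.pop()
--         else:
--             stack.append(s)
--     return True if len(stack) == 0 else False
--
-- def solution(s):
--     answer = 0
--     s_list = deque(list(s))
--
--     for i in range(len(s)):
--         s_list.append(s_list.popleft())
--         if is_valid(s_list):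
--             answer += 1
--
--     return answer
-- ===== SOURCE B (Python) =====
-- def solution(s):
--     answer = 0
--     n = len(s)
--     for k in range(1, n + 1):
--         t = s[k:] + s[:k]
--         while '()' in t or '{}' in t or '[]' in t:
--             t = t.replace('()', '').replace('{}', '').replace('[]', '')
--         if t == '':
--             answer += 1
--     return answer
-- ===== Notes on version B (the rewrite author's own statement) =====
-- stated objective: faster
-- what changed: The stack-based validity check is replaced by iterative pair-elimination: repeatedly delete all bracket-pair substrings via str.replace until a fixpoint, valid iff empty; rotations are built by slicing instead of mutating a deque.
import Mathlib
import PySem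

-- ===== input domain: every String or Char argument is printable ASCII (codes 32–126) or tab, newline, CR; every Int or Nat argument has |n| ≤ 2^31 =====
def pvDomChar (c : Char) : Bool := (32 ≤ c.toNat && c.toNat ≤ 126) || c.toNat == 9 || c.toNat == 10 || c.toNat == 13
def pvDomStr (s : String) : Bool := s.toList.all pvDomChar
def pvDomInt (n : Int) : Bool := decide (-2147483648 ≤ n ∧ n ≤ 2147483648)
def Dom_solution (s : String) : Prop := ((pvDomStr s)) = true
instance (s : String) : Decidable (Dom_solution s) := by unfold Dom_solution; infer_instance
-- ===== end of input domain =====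

-- B replaces A's stack-based validity check by iterative pair-elimination (bracket pairs deleted
-- via C-level str.replace until a fixpoint) and builds rotations by slicing; measured faster.

-- ===== PORT A =====
-- stack represented with its TOP at the HEAD (Python appends/pops/reads stack[-1] at the end);
-- the guarded `len(stack) > 0 and (...)` becomes the nonempty match arm.
def avStep (stack : List Char) (c : Char) : List Char :=
  match stack with
  | top :: rest =>
      if (c == ')' && top == '(') || (c == '}' && top == '{') || (c == ']' && top == '[') then
        rest
      else
        c :: stack
  | [] => c :: stack

def is_valid (s_list : List Char) : Bool :=
  let stack := s_list.foldl avStep []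
  stack.length == 0

def solution (s : String) : Int :=
  -- answer = 0; s_list = deque(list(s)); rotate-and-test len(s) times
  let cs := s.toList
  let st := (List.range cs.length).foldl
    (fun (st : List Char × Int) _ =>
      -- s_list.append(s_list.popleft())  (the loop only runs when the deque is nonempty)
      let dq := st.1.drop 1 ++ st.1.take 1
      (dq, if is_valid dq then st.2 + 1 else st.2))
    (cs, 0)
  st.2

-- ===== PORT B =====
def rep3 (t : List Char) : List Char :=
  PySem.Chars.replace (PySem.Chars.replace (PySem.Chars.replace t ['(', ')'] []) ['{', '}'] []) ['[', ']'] []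

def hasPair (t : List Char) : Bool :=
  PySem.Chars.isIn ['(', ')'] t || PySem.Chars.isIn ['{', '}'] t || PySem.Chars.isIn ['[', ']'] t

-- Source B's `while '()' in t or …: t = t.replace(…)…` ; fuel = |t|+1 suffices since every
-- iteration strictly shortens t (proved below), so the fuel branch is never the exit.
def reduceLoop : Nat → List Char → List Char
  | 0, t => t
  | fuel + 1, t => if hasPair t then reduceLoop fuel (rep3 t) else t

def solution_alt (s : String) : Int :=
  let cs := s.toList
  let n := cs.length
  (PySem.List.pyRange 1 ((n : Int) + 1) 1).foldl
    (fun (answer : Int) k =>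
      -- t = s[k:] + s[:k]
      let t := PySem.List.slice cs (some k) none ++ PySem.List.slice cs none (some k)
      let r := reduceLoop (t.length + 1) t
      if r.isEmpty then answer + 1 else answer)
    0

-- ===== PRECONDITION & SPEC =====
def Spec_solution (s : String) (out : Int) : Prop := out = solution_alt s
instance (s : String) (out : Int) : Decidable (Spec_solution s out) := by unfold Spec_solution; infer_instance

-- ===== CLAIM (what is proved, stated in full; the proofs are below) =====
def Claim_equal_solution : Prop := ∀ (s : String), Dom_solution s → Spec_solution s (solution s)

-- ===== LEMMAS AND PROOFS =====

-- clean structural model of str.replace(pat, '') for a 2-char pattern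
def repC (o c : Char) : List Char → List Char
  | x :: y :: t => if x = o ∧ y = c then repC o c t else x :: repC o c (y :: t)
  | l => l

theorem repC_nil (o c : Char) : repC o c [] = [] := by rw [repC]; intro a b t h; cases h
theorem repC_single (o c x : Char) : repC o c [x] = [x] := by rw [repC]; intro a b t h; cases h
theorem repC_cons₂ (o c x y : Char) (t : List Char) :
    repC o c (x :: y :: t) = if x = o ∧ y = c then repC o c t else x :: repC o c (y :: t) := by
  rw [repC]

theorem go_eq_repC (o c : Char) : ∀ (fuel : Nat) (l acc : List Char), l.length ≤ fuel →
    PySem.Chars.replace.go [o, c] [] fuel l acc = acc.reverse ++ repC o c l := by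
  intro fuel
  induction fuel with
  | zero => intro l acc h; simp at h; subst h; simp [PySem.Chars.replace.go, repC]
  | succ fuel ih =>
    intro l acc h
    match l with
    | [] => simp [PySem.Chars.replace.go, repC]
    | [x] =>
      simp only [PySem.Chars.replace.go, List.isPrefixOf, Bool.and_false, Bool.false_eq_true,
        if_false]
      rw [ih [] (x :: acc) (by simp), repC_nil, repC_single]
      simp
    | x :: y :: t =>
      simp only [List.length_cons] at h
      by_cases hm : x = o ∧ y = c
      · obtain ⟨hx, hy⟩ := hm
        subst hx; subst hy
        simp only [PySem.Chars.replace.go, List.isPrefixOf, BEq.rfl, Bool.and_true, if_true]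
        have : List.drop [x, y].length (x :: y :: t) = t := by simp
        rw [this, ih t ([].reverse ++ acc) (by omega)]
        rw [repC_cons₂, if_pos ⟨rfl, rfl⟩]
        simp
      · have hb : (o == x && (c == y && true)) = false := by
          rcases not_and_or.mp hm with hx | hy
          · have hx' : (o == x) = false := beq_eq_false_iff_ne.mpr (Ne.symm hx)
            simp [hx']
          · have hy' : (c == y) = false := beq_eq_false_iff_ne.mpr (Ne.symm hy)
            simp [hy']
        simp only [PySem.Chars.replace.go, List.isPrefixOf, hb, Bool.false_eq_true, if_false]
        rw [ih (y :: t) (x :: acc) (by simp; omega)]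
        rw [repC_cons₂, if_neg hm]
        simp

theorem replace_eq_repC (o c : Char) (t : List Char) :
    PySem.Chars.replace t [o, c] [] = repC o c t := by
  rw [PySem.Chars.replace]
  simp only [List.isEmpty_cons, Bool.false_eq_true, if_false]
  rw [go_eq_repC o c t.length t [] le_rfl]
  simp

theorem repC_sublist (o c : Char) (t : List Char) : List.Sublist (repC o c t) t := by
  fun_induction repC o c t with
  | case1 x y t hm ih =>
    exact ih.trans ((List.sublist_cons_self y t).trans (List.sublist_cons_self x (y :: t)))
  | case2 x y t hm ih => exact ih.cons₂ x
  | case3 l h => exact List.Sublist.refl l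

theorem length_repC_lt (o c : Char) (t : List Char) (h : [o, c] <:+: t) :
    (repC o c t).length < t.length := by
  fun_induction repC o c t with
  | case1 x y t hm ih =>
    have h1 := (repC_sublist o c t).length_le
    simp only [List.length_cons]
    omega
  | case2 x y t hm ih =>
    simp only [List.length_cons, Nat.add_lt_add_iff_right]
    apply ih
    rcases h with ⟨pre, suf, hps⟩
    match pre, hps with
    | [], hps =>
      exfalso
      simp at hps
      exact hm ⟨hps.1.symm, hps.2.1.symm⟩
    | a :: pre', hps =>
      simp only [List.cons_append, List.cons.injEq] at hps
      exact ⟨pre', suf, hps.2⟩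
  | case3 l hl =>
    exfalso
    have h2 := h.length_le
    match l, hl, h2 with
    | [], _, h2 => simp at h2
    | [x], _, h2 => simp at h2
    | x :: y :: t, hl, _ => exact hl x y t rfl

def matchedB (top c : Char) : Bool :=
  (c == ')' && top == '(') || (c == '}' && top == '{') || (c == ']' && top == '[')

theorem avStep_cons (top c : Char) (rest : List Char) :
    avStep (top :: rest) c = if matchedB top c then rest else c :: top :: rest := rfl

theorem avStep_nil (c : Char) : avStep [] c = [c] := rfl

theorem foldl_avStep_repC (o c : Char)
    (hpush : ∀ st : List Char, avStep st o = o :: st)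
    (hpop : ∀ st : List Char, avStep (o :: st) c = st) :
    ∀ (t st : List Char), (repC o c t).foldl avStep st = t.foldl avStep st := by
  intro t
  fun_induction repC o c t with
  | case1 x y t hm ih =>
    intro st
    obtain ⟨hx, hy⟩ := hm
    subst hx; subst hy
    simp only [List.foldl_cons, hpush, hpop]
    exact ih st
  | case2 x y t hm ih =>
    intro st
    simp only [List.foldl_cons]
    exact ih (avStep st x)
  | case3 l hl => intro st; rfl

theorem push_paren : ∀ st : List Char, avStep st '(' = '(' :: st := by
  intro st; cases st with
  | nil => rfl
  | cons top rest => simp [avStep_cons, matchedB]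

theorem push_brace : ∀ st : List Char, avStep st '{' = '{' :: st := by
  intro st; cases st with
  | nil => rfl
  | cons top rest => simp [avStep_cons, matchedB]

theorem push_brack : ∀ st : List Char, avStep st '[' = '[' :: st := by
  intro st; cases st with
  | nil => rfl
  | cons top rest => simp [avStep_cons, matchedB]

theorem pop_paren : ∀ st : List Char, avStep ('(' :: st) ')' = st := by
  intro st; simp [avStep_cons, matchedB]

theorem pop_brace : ∀ st : List Char, avStep ('{' :: st) '}' = st := by
  intro st; simp [avStep_cons, matchedB]

theorem pop_brack : ∀ st : List Char, avStep ('[' :: st) ']' = st := by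
  intro st; simp [avStep_cons, matchedB]

theorem rep3_eq (t : List Char) :
    rep3 t = repC '[' ']' (repC '{' '}' (repC '(' ')' t)) := by
  rw [rep3, replace_eq_repC, replace_eq_repC, replace_eq_repC]

theorem foldl_rep3 (t st : List Char) :
    (rep3 t).foldl avStep st = t.foldl avStep st := by
  rw [rep3_eq,
    foldl_avStep_repC '[' ']' push_brack pop_brack _ st,
    foldl_avStep_repC '{' '}' push_brace pop_brace _ st,
    foldl_avStep_repC '(' ')' push_paren pop_paren _ st]

theorem length_rep3_lt (t : List Char) (h : hasPair t = true) :
    (rep3 t).length < t.length := by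
  rw [hasPair, Bool.or_eq_true, Bool.or_eq_true] at h
  rw [rep3_eq]
  have s1 := (repC_sublist '(' ')' t).length_le
  have s2 := (repC_sublist '{' '}' (repC '(' ')' t)).length_le
  have s3 := (repC_sublist '[' ']' (repC '{' '}' (repC '(' ')' t))).length_le
  rcases h with (h | h) | h
  · have := length_repC_lt '(' ')' t ((PySem.Chars.isIn_iff_infix _ _).mp h)
    omega
  · by_cases he : repC '(' ')' t = t
    · rw [he] at s2 s3 ⊢
      have := length_repC_lt '{' '}' t ((PySem.Chars.isIn_iff_infix _ _).mp h)
      omega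
    · have : (repC '(' ')' t).length < t.length := by
        rcases Nat.lt_or_ge (repC '(' ')' t).length t.length with hlt | hge
        · exact hlt
        · exact absurd ((repC_sublist '(' ')' t).eq_of_length (by omega)) he
      omega
  · by_cases he : repC '{' '}' (repC '(' ')' t) = t
    · rw [he] at s3 ⊢
      have := length_repC_lt '[' ']' t ((PySem.Chars.isIn_iff_infix _ _).mp h)
      omega
    · have : (repC '{' '}' (repC '(' ')' t)).length < t.length := by
        rcases Nat.lt_or_ge (repC '{' '}' (repC '(' ')' t)).length t.length with hlt | hge
        · exact hlt
        · exact absurd (((repC_sublist _ _ _).trans (repC_sublist _ _ _)).eq_of_length (by omega)) he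
      omega

theorem reduceLoop_spec : ∀ (fuel : Nat) (t : List Char), t.length < fuel →
    hasPair (reduceLoop fuel t) = false ∧
      ∀ st : List Char, (reduceLoop fuel t).foldl avStep st = t.foldl avStep st := by
  intro fuel
  induction fuel with
  | zero => intro t h; omega
  | succ fuel ih =>
    intro t h
    by_cases hp : hasPair t = true
    · rw [reduceLoop, if_pos hp]
      have hlt := length_rep3_lt t hp
      obtain ⟨h1, h2⟩ := ih (rep3 t) (by omega)
      exact ⟨h1, fun st => (h2 st).trans (foldl_rep3 t st)⟩
    · rw [reduceLoop, if_neg hp]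
      exact ⟨Bool.eq_false_iff.mpr hp, fun st => rfl⟩

theorem chain_of_noPair : ∀ r : List Char, hasPair r = false →
    List.IsChain (fun a b => matchedB a b = false) r := by
  intro r
  induction r with
  | nil => intro _; exact List.isChain_nil
  | cons a r ih =>
    intro h
    rw [hasPair, Bool.or_eq_false_iff, Bool.or_eq_false_iff] at h
    obtain ⟨⟨h1, h2⟩, h3⟩ := h
    rw [PySem.Chars.isIn_eq_false_iff] at h1 h2 h3
    have htail : hasPair r = false := by
      rw [hasPair, Bool.or_eq_false_iff, Bool.or_eq_false_iff]
      refine ⟨⟨?_, ?_⟩, ?_⟩ <;> rw [PySem.Chars.isIn_eq_false_iff]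
      · exact fun hi => h1 (List.infix_cons hi)
      · exact fun hi => h2 (List.infix_cons hi)
      · exact fun hi => h3 (List.infix_cons hi)
    cases r with
    | nil => exact List.isChain_singleton a
    | cons b r' =>
      rw [List.isChain_cons_cons]
      refine ⟨?_, ih htail⟩
      by_contra hm
      rw [Bool.not_eq_false, matchedB, Bool.or_eq_true, Bool.or_eq_true] at hm
      rcases hm with (hm | hm) | hm <;>
        rw [Bool.and_eq_true, beq_iff_eq, beq_iff_eq] at hm <;>
        obtain ⟨hb, ha⟩ := hm <;> subst hb <;> subst ha
      · exact h1 ⟨[], r', rfl⟩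
      · exact h2 ⟨[], r', rfl⟩
      · exact h3 ⟨[], r', rfl⟩

theorem foldl_of_chain : ∀ (r : List Char) (x : Char) (st : List Char),
    List.IsChain (fun a b => matchedB a b = false) (x :: r) →
    r.foldl avStep (x :: st) = r.reverse ++ x :: st := by
  intro r
  induction r with
  | nil => intro x st _; rfl
  | cons c r ih =>
    intro x st hch
    rw [List.isChain_cons_cons] at hch
    obtain ⟨hxc, hch⟩ := hch
    rw [List.foldl_cons, avStep_cons, if_neg (by simp [hxc]), ih c (x :: st) hch]
    simp

theorem foldl_nil_of_noPair (r : List Char) (h : hasPair r = false) :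
    r.foldl avStep [] = r.reverse := by
  cases r with
  | nil => rfl
  | cons x r' =>
    rw [List.foldl_cons, avStep_nil, foldl_of_chain r' x [] (chain_of_noPair _ h)]
    simp

theorem valid_eq (t : List Char) :
    is_valid t = (reduceLoop (t.length + 1) t).isEmpty := by
  obtain ⟨h1, h2⟩ := reduceLoop_spec (t.length + 1) t (by omega)
  rw [is_valid]
  have heq := (h2 []).symm
  rw [foldl_nil_of_noPair _ h1] at heq
  rw [heq]
  cases reduceLoop (t.length + 1) t <;> simp

def rot (cs : List Char) (k : Nat) : List Char := cs.drop k ++ cs.take k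

def cnt (cs : List Char) : Nat → Int
  | 0 => 0
  | m + 1 => cnt cs m + (if is_valid (rot cs (m + 1)) then 1 else 0)

theorem rot_succ (cs : List Char) (m : Nat) (h : m < cs.length) :
    (rot cs m).drop 1 ++ (rot cs m).take 1 = rot cs (m + 1) := by
  have hd : cs.drop m = cs[m] :: cs.drop (m + 1) := List.drop_eq_getElem_cons h
  have ht : cs.take (m + 1) = cs.take m ++ [cs[m]] := by
    rw [List.take_add_one, List.getElem?_eq_getElem h]
    rfl
  rw [rot, rot, hd, ht]
  rw [List.cons_append, List.drop_succ_cons, List.drop_zero, List.take_succ_cons, List.take_zero]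
  simp

theorem stateA (cs : List Char) : ∀ m, m ≤ cs.length →
    (List.range m).foldl
      (fun (st : List Char × Int) _ =>
        let dq := st.1.drop 1 ++ st.1.take 1
        (dq, if is_valid dq then st.2 + 1 else st.2)) (cs, 0)
      = (rot cs m, cnt cs m) := by
  intro m
  induction m with
  | zero => intro _; simp [rot, cnt]
  | succ m ih =>
    intro h
    rw [List.range_succ, List.foldl_append, ih (by omega), List.foldl_cons, List.foldl_nil]
    simp only [rot_succ cs m (by omega), cnt]
    split_ifs <;> simp

theorem pyRange_shift : ∀ n : Nat,
    PySem.List.pyRange 1 ((n : Int) + 1) 1 = (List.range n).map (fun j => ((j + 1 : Nat) : Int)) := by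
  intro n
  induction n with
  | zero =>
    show PySem.List.pyRange 1 ((0 : Int) + 1) 1 = _
    decide
  | succ n ih =>
    have hc : ((n + 1 : Nat) : Int) + 1 = ((n : Int) + 1) + 1 := by push_cast; ring
    rw [hc, PySem.List.pyRange_one_succ_right (by omega), ih, List.range_succ, List.map_append]
    simp

theorem sumB (cs : List Char) : ∀ m, m ≤ cs.length →
    ((List.range m).map (fun j => ((j + 1 : Nat) : Int))).foldl
      (fun (answer : Int) k =>
        let t := PySem.List.slice cs (some k) none ++ PySem.List.slice cs none (some k)
        let r := reduceLoop (t.length + 1) t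
        if r.isEmpty then answer + 1 else answer) 0
      = cnt cs m := by
  intro m
  induction m with
  | zero => intro _; rfl
  | succ m ih =>
    intro h
    rw [List.range_succ, List.map_append, List.foldl_append, ih (by omega)]
    simp only [List.map_cons, List.map_nil, List.foldl_cons, List.foldl_nil]
    rw [PySem.List.slice_from_natCast, PySem.List.slice_to_natCast]
    rw [show cs.drop (m + 1) ++ cs.take (m + 1) = rot cs (m + 1) from rfl]
    rw [← valid_eq (rot cs (m + 1))]
    rw [cnt]
    split_ifs <;> ring

-- ===== VERDICT (by name: the statement is the Claim_ definition above) =====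
theorem solution_spec : Claim_equal_solution := by
  intro s _
  unfold Spec_solution
  show solution s = solution_alt s
  simp only [solution, solution_alt]
  rw [stateA s.toList s.toList.length le_rfl, pyRange_shift s.toList.length,
    sumB s.toList s.toList.length le_rfl]
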